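-- pv_equiv track=rewrite | github.com/hypergraphman/2GruppaEGE24 | task23/19.py | f
-- ===== SOURCE A (Python) =====
-- def f(c, e, k):
--     if c > e or k > 6:
--         return 0
--     if c == e:
--         return 1
--     m = [f(c + 1, e, k + 1),
--          f(c * 2, e, k + 1),
--          f(c ** 2, e, k + 1)]
--     return sum(m)
-- ===== SOURCE B (Python) =====
-- def f(c, e, k):
--     # Level-synchronous BFS over the implicit tree instead of recursion:
--     # all states at the same depth share the same k, so we keep one frontier
--     # of c-values per level and count hits as we go.
--     total = 0
--     frontier = [c]
--     kk = k
--     while kk <= 6 and frontier: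
--         nxt = []
--         for cc in frontier:
--             if cc > e:
--                 continue
--             if cc == e:
--                 total += 1
--             else:
--                 nxt.extend((cc + 1, cc * 2, cc * cc))
--         frontier = nxt
--         kk += 1
--     return total
-- ===== Notes on version B (the rewrite author's own statement) =====
-- stated objective: alternative
-- what changed: Replaces the triple recursion with an iterative level-synchronous BFS: one frontier list of c-values per depth, a single running counter, and a loop bounded by the depth cap.
-- outside the precondition, e.g. on f(1, 2, -985): A returns 1982, B returns 1982
import Mathlib
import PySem

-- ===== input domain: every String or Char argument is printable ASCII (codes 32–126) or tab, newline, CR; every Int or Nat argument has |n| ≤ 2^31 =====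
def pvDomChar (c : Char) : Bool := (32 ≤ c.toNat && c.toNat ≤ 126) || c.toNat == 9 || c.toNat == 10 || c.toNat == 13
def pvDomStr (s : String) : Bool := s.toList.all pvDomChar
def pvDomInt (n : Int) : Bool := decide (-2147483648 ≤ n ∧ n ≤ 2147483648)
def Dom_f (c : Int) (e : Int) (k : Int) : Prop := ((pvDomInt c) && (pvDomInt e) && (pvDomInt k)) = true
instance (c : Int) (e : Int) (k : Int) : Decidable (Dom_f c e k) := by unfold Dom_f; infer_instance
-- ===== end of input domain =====

-- B replaces the triple recursion by an iterative level-synchronous BFS (one frontier per depth,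
-- a running counter); same value, same cost order (objective: alternative decomposition).

-- ===== PORT A =====
def f (c : Int) (e : Int) (k : Int) : Int :=
  if c > e ∨ k > 6 then 0
  else if c = e then 1
  else
    let m := [f (c + 1) e (k + 1), f (c * 2) e (k + 1), f (c ^ 2) e (k + 1)]
    m.sum
termination_by (7 - k).toNat
decreasing_by all_goals omega

-- ===== PORT B =====
-- body of the 'for cc in frontier' loop: accumulates (total, nxt)
def pvStep (e : Int) (acc : Int × List Int) (cc : Int) : Int × List Int :=
  if cc > e then acc
  else if cc = e then (acc.1 + 1, acc.2)
  else (acc.1, acc.2 ++ [cc + 1, cc * 2, cc * cc])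

-- the 'while kk <= 6 and frontier' loop
def pvLoop (e : Int) (total : Int) (frontier : List Int) (kk : Int) : Int :=
  if kk ≤ 6 ∧ frontier ≠ [] then
    let r := frontier.foldl (pvStep e) (total, [])
    pvLoop e r.1 r.2 (kk + 1)
  else total
termination_by (7 - kk).toNat
decreasing_by omega

def f_alt (c : Int) (e : Int) (k : Int) : Int := pvLoop e 0 [c] k

-- ===== PRECONDITION & SPEC =====
-- Pre_ excludes only c < e with k ≤ -981 whose state graph has a chain longer than the stack
-- budget (c ≤ 1, where c*2 or c**2 loops on 0/1, or e - c > 960): there A's recursion depth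
-- reaches CPython's ~1000-frame limit and A raises RecursionError; the few depths of margin
-- exist because the exact limit depends on the interpreter's stack, and in that margin the two
-- programs return the same value (see cites).
def Pre_f (c : Int) (e : Int) (k : Int) : Prop := c ≥ e ∨ -980 ≤ k ∨ (2 ≤ c ∧ e - c ≤ 960)
instance (c : Int) (e : Int) (k : Int) : Decidable (Pre_f c e k) := by unfold Pre_f; infer_instance
def pvWitness_f : Int × Int × Int := (0, 5, 0)

def Spec_f (c : Int) (e : Int) (k : Int) (out : Int) : Prop := out = f_alt c e k
instance (c : Int) (e : Int) (k : Int) (out : Int) : Decidable (Spec_f c e k out) := by unfold Spec_f; infer_instance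

-- ===== CLAIM (what is proved, stated in full; the proofs are below) =====
def Claim_equal_f : Prop := ∀ (c : Int) (e : Int) (k : Int), Dom_f c e k → Pre_f c e k → Spec_f c e k (f c e k)

-- ===== LEMMAS AND PROOFS =====

-- per-state "hit" contribution of a frontier element at a level with kk ≤ 6
def pvHit (e cc : Int) : Int := if cc > e then 0 else if cc = e then 1 else 0

-- children pushed to the next frontier for one element
def pvKids (e cc : Int) : List Int :=
  if cc > e ∨ cc = e then [] else [cc + 1, cc * 2, cc * cc]

lemma pvStep_fold (e : Int) (l : List Int) : ∀ (t : Int) (acc : List Int),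
    l.foldl (pvStep e) (t, acc) = (t + (l.map (pvHit e)).sum, acc ++ l.flatMap (pvKids e)) := by
  induction l with
  | nil => simp
  | cons x xs ih =>
    intro t acc
    simp only [List.foldl_cons, List.map_cons, List.sum_cons, List.flatMap_cons]
    rw [pvStep]
    split_ifs with h1 h2
    · rw [ih]
      simp [pvHit, pvKids, h1]
    · rw [ih]
      subst h2
      simp [pvHit, pvKids]
      ring
    · rw [ih]
      simp only [pvHit, pvKids, if_neg h1, if_neg h2,
        if_neg (show ¬(x > e ∨ x = e) from by tauto)]
      simp [List.append_assoc]

lemma f_of_gt6 (c e k : Int) (h : k > 6) : f c e k = 0 := by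
  rw [f]; simp [h]

lemma f_unfold_step (c e k : Int) (hk : k ≤ 6) :
    f c e k = pvHit e c + ((pvKids e c).map (fun x => f x e (k + 1))).sum := by
  rw [f]
  by_cases h1 : c > e
  · simp [pvHit, pvKids, h1]
  · by_cases h2 : c = e
    · simp [pvHit, pvKids, h2, show ¬(6 < k) from by omega]
    · simp only [pvHit, pvKids, if_neg (show ¬(c > e ∨ k > 6) from by omega),
        if_neg h2, if_neg h1, if_neg (show ¬(c > e ∨ c = e) from by tauto),
        List.map_cons, List.map_nil, List.sum_cons, List.sum_nil]
      have hsq : c ^ 2 = c * c := sq c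
      rw [hsq]
      ring

lemma pvLevel (e k : Int) (hk : k ≤ 6) (l : List Int) :
    (l.map (fun x => f x e k)).sum
      = (l.map (pvHit e)).sum + ((l.flatMap (pvKids e)).map (fun x => f x e (k + 1))).sum := by
  induction l with
  | nil => simp
  | cons x xs ih =>
    simp only [List.map_cons, List.sum_cons, List.flatMap_cons, List.map_append, List.sum_append]
    rw [ih, f_unfold_step x e k hk]
    ring

lemma pvLoop_eq (e : Int) : ∀ (n : ℕ) (kk : Int), (7 - kk).toNat ≤ n →
    ∀ (total : Int) (frontier : List Int),
    pvLoop e total frontier kk = total + (frontier.map (fun x => f x e kk)).sum := by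
  intro n
  induction n with
  | zero =>
    intro kk hn total frontier
    have hk : kk > 6 := by omega
    rw [pvLoop]
    simp only [show ¬(kk ≤ 6 ∧ frontier ≠ []) from by omega, if_neg, not_false_iff]
    have : (frontier.map (fun x => f x e kk)).sum = 0 := by
      apply List.sum_eq_zero
      intro y hy
      obtain ⟨x, _, rfl⟩ := List.mem_map.mp hy
      exact f_of_gt6 x e kk hk
    simp [this]
  | succ n ih =>
    intro kk hn total frontier
    rw [pvLoop]
    by_cases hc : kk ≤ 6 ∧ frontier ≠ []
    · rw [if_pos hc]
      rw [pvStep_fold]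
      simp only [List.nil_append]
      rw [ih (kk + 1) (by omega)]
      rw [pvLevel e kk hc.1 frontier]
      ring
    · rw [if_neg hc]
      rcases not_and_or.mp hc with h | h
      · have hk : kk > 6 := by omega
        have : (frontier.map (fun x => f x e kk)).sum = 0 := by
          apply List.sum_eq_zero
          intro y hy
          obtain ⟨x, _, rfl⟩ := List.mem_map.mp hy
          exact f_of_gt6 x e kk hk
        simp [this]
      · have : frontier = [] := by simpa using h
        simp [this]

-- ===== VERDICT (by name: the statement is the Claim_ definition above) =====
theorem f_spec : Claim_equal_f := by
  intro c e k _ _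
  unfold Spec_f f_alt
  rw [pvLoop_eq e (7 - k).toNat k le_rfl]
  simp
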